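-- pv_equiv track=rewrite | github.com/arthur-liu-lsh/aoc2023 | d22.py | above_bricks
-- ===== SOURCE A (Python) =====
-- def above_bricks(brick, bricks):
--     res = set()
--     z = max(brick[2], brick[5])+1
--     x_min = min(brick[0], brick[3])
--     x_max = max(brick[0], brick[3])
--     y_min = min(brick[1], brick[4])
--     y_max = max(brick[1], brick[4])
--     for other_brick in bricks:
--         for x in range(x_min, x_max+1):
--             for y in range(y_min, y_max+1):
--                 if brick_contains(other_brick, x, y, z):
--                     res.add(other_brick)
--     return res
--
-- def brick_contains(brick, x, y, z):
--     x_min = min(brick[0], brick[3])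
--     x_max = max(brick[0], brick[3])
--     y_min = min(brick[1], brick[4])
--     y_max = max(brick[1], brick[4])
--     z_min = min(brick[2], brick[5])
--     z_max = max(brick[2], brick[5])
--     if x not in range(x_min, x_max+1):
--         return False
--     if y not in range(y_min, y_max+1):
--         return False
--     if z not in range(z_min, z_max+1):
--         return False
--     return True
-- ===== SOURCE B (Python) =====
-- def above_bricks(brick, bricks):
--     z = max(brick[2], brick[5]) + 1
--     x_min = min(brick[0], brick[3])
--     x_max = max(brick[0], brick[3])
--     y_min = min(brick[1], brick[4])
--     y_max = max(brick[1], brick[4])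
--     return {b for b in bricks
--             if min(b[2], b[5]) <= z <= max(b[2], b[5])
--             and min(b[0], b[3]) <= x_max and x_min <= max(b[0], b[3])
--             and min(b[1], b[4]) <= y_max and y_min <= max(b[1], b[4])}
-- ===== Notes on version B (the rewrite author's own statement) =====
-- stated objective: faster
-- what changed: Replaces A's per-cell enumeration of the footprint rectangle (nested range loops calling brick_contains for every (x,y) cell) with a single filter pass using O(1) interval-intersection arithmetic per brick.
import Mathlib
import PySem

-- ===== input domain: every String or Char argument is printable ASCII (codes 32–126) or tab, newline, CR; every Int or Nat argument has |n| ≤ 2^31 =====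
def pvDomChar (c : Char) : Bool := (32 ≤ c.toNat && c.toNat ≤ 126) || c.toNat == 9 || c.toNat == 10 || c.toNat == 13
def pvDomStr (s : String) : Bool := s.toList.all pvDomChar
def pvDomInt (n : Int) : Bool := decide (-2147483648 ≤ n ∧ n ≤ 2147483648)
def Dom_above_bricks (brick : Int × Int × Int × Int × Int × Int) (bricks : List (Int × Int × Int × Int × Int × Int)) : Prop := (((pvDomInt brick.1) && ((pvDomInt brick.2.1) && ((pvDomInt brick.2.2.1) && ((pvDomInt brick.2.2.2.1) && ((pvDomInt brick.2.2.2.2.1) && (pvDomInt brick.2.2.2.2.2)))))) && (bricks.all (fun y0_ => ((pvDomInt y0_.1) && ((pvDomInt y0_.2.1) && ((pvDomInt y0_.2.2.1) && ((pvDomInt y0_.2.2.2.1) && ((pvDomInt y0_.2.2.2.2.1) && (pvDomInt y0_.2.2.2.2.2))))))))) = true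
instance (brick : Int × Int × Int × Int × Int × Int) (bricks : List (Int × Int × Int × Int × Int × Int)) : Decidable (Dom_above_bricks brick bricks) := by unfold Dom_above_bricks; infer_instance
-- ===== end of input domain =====

-- ===== PORT A =====
-- Header: B replaces A's per-cell footprint enumeration with one interval-overlap test per brick (faster).
def brick_contains (b : Int × Int × Int × Int × Int × Int) (x y z : Int) : Bool :=
  let x_min := min b.1 b.2.2.2.1
  let x_max := max b.1 b.2.2.2.1
  let y_min := min b.2.1 b.2.2.2.2.1
  let y_max := max b.2.1 b.2.2.2.2.1
  let z_min := min b.2.2.1 b.2.2.2.2.2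
  let z_max := max b.2.2.1 b.2.2.2.2.2
  -- 'v in range(a, b)' is Python's O(1) range membership test: a ≤ v < b (step 1)
  if ¬ (decide (x_min ≤ x ∧ x < x_max + 1)) then false
  else if ¬ (decide (y_min ≤ y ∧ y < y_max + 1)) then false
  else if ¬ (decide (z_min ≤ z ∧ z < z_max + 1)) then false
  else true

def above_bricks (brick : Int × Int × Int × Int × Int × Int) (bricks : List (Int × Int × Int × Int × Int × Int)) : List (Int × Int × Int × Int × Int × Int) :=
  let z := max brick.2.2.1 brick.2.2.2.2.2 + 1
  let x_min := min brick.1 brick.2.2.2.1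
  let x_max := max brick.1 brick.2.2.2.1
  let y_min := min brick.2.1 brick.2.2.2.2.1
  let y_max := max brick.2.1 brick.2.2.2.2.1
  bricks.foldl (fun res other_brick =>
    (PySem.List.pyRange x_min (x_max+1) 1).foldl (fun res x =>
      (PySem.List.pyRange y_min (y_max+1) 1).foldl (fun res y =>
        if brick_contains other_brick x y z then PySem.Set.add res other_brick else res)
        res) res) PySem.Set.empty

-- ===== PORT B =====
def above_bricks_alt (brick : Int × Int × Int × Int × Int × Int) (bricks : List (Int × Int × Int × Int × Int × Int)) : List (Int × Int × Int × Int × Int × Int) :=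
  let z := max brick.2.2.1 brick.2.2.2.2.2 + 1
  let x_min := min brick.1 brick.2.2.2.1
  let x_max := max brick.1 brick.2.2.2.1
  let y_min := min brick.2.1 brick.2.2.2.2.1
  let y_max := max brick.2.1 brick.2.2.2.2.1
  PySem.Set.ofList (bricks.filter (fun b =>
    decide (min b.2.2.1 b.2.2.2.2.2 ≤ z ∧ z ≤ max b.2.2.1 b.2.2.2.2.2) &&
    (decide (min b.1 b.2.2.2.1 ≤ x_max) && decide (x_min ≤ max b.1 b.2.2.2.1)) &&
    (decide (min b.2.1 b.2.2.2.2.1 ≤ y_max) && decide (y_min ≤ max b.2.1 b.2.2.2.2.1))))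

-- ===== PRECONDITION & SPEC =====
def Spec_above_bricks (brick : Int × Int × Int × Int × Int × Int) (bricks : List (Int × Int × Int × Int × Int × Int)) (out : List (Int × Int × Int × Int × Int × Int)) : Prop := out = above_bricks_alt brick bricks
instance (brick : Int × Int × Int × Int × Int × Int) (bricks : List (Int × Int × Int × Int × Int × Int)) (out : List (Int × Int × Int × Int × Int × Int)) : Decidable (Spec_above_bricks brick bricks out) := by unfold Spec_above_bricks; infer_instance

-- ===== CLAIM (what is proved, stated in full; the proofs are below) =====
def Claim_equal_above_bricks : Prop := ∀ (brick : Int × Int × Int × Int × Int × Int) (bricks : List (Int × Int × Int × Int × Int × Int)), Dom_above_bricks brick bricks → Spec_above_bricks brick bricks (above_bricks brick bricks)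

-- ===== LEMMAS AND PROOFS =====

-- ===== VERDICT (by name: the statement is the Claim_ definition above) =====
-- folding "if c a then add e" over a list collapses to a single conditional add
theorem foldl_ite_add {α β : Type} [BEq α] [LawfulBEq α] (l : List β) (c : β → Bool) (e : α)
    (s : PySem.Set α) :
    l.foldl (fun r a => if c a then PySem.Set.add r e else r) s
      = if l.any c then PySem.Set.add s e else s := by
  induction l generalizing s with
  | nil => simp
  | cons hd tl ih =>
    by_cases h : c hd = true <;> simp [h, ih]

-- conditional-add foldl is ofList-style foldl over the filtered list
theorem foldl_ite_add_self {α : Type} [BEq α] [LawfulBEq α] (l : List α) (P : α → Bool)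
    (s : PySem.Set α) :
    l.foldl (fun r a => if P a then PySem.Set.add r a else r) s
      = (l.filter P).foldl PySem.Set.add s := by
  induction l generalizing s with
  | nil => rfl
  | cons hd tl ih => by_cases h : P hd = true <;> simp [h, ih]

-- brick_contains as a plain conjunction of bounds
theorem brick_contains_iff (o : Int × Int × Int × Int × Int × Int) (x y z : Int) :
    brick_contains o x y z = true ↔
      (min o.1 o.2.2.2.1 ≤ x ∧ x < max o.1 o.2.2.2.1 + 1) ∧
      (min o.2.1 o.2.2.2.2.1 ≤ y ∧ y < max o.2.1 o.2.2.2.2.1 + 1) ∧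
      (min o.2.2.1 o.2.2.2.2.2 ≤ z ∧ z < max o.2.2.1 o.2.2.2.2.2 + 1) := by
  simp [brick_contains]

-- a cell of the (nonempty) footprint rectangle exists at level z inside the other
-- brick iff the intervals intersect
theorem any_cell_iff (o : Int × Int × Int × Int × Int × Int) (x_min x_max y_min y_max z : Int)
    (hx : x_min ≤ x_max) (hy : y_min ≤ y_max) :
    ((PySem.List.pyRange x_min (x_max+1) 1).any (fun x =>
      (PySem.List.pyRange y_min (y_max+1) 1).any (fun y => brick_contains o x y z)))
    = (decide (min o.2.2.1 o.2.2.2.2.2 ≤ z ∧ z ≤ max o.2.2.1 o.2.2.2.2.2) &&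
      (decide (min o.1 o.2.2.2.1 ≤ x_max) && decide (x_min ≤ max o.1 o.2.2.2.1)) &&
      (decide (min o.2.1 o.2.2.2.2.1 ≤ y_max) && decide (y_min ≤ max o.2.1 o.2.2.2.2.1))) := by
  rw [Bool.eq_iff_iff]
  simp only [List.any_eq_true, PySem.List.mem_pyRange_one, brick_contains_iff,
    Bool.and_eq_true, decide_eq_true_eq]
  obtain ⟨o1, o2, o3, o4, o5, o6⟩ := o
  constructor
  · rintro ⟨x, hx', y, hy', hcx, hcy, hcz⟩
    exact ⟨⟨⟨hcz.1, Int.lt_add_one_iff.mp hcz.2⟩,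
            le_trans hcx.1 (Int.lt_add_one_iff.mp hx'.2),
            le_trans hx'.1 (Int.lt_add_one_iff.mp hcx.2)⟩,
           le_trans hcy.1 (Int.lt_add_one_iff.mp hy'.2),
           le_trans hy'.1 (Int.lt_add_one_iff.mp hcy.2)⟩
  · rintro ⟨⟨hz, ha, hb⟩, hc', hd⟩
    refine ⟨max x_min (min o1 o4),
            ⟨le_max_left _ _, Int.lt_add_one_iff.mpr (max_le hx ha)⟩,
            max y_min (min o2 o5),
            ⟨le_max_left _ _, Int.lt_add_one_iff.mpr (max_le hy hc')⟩,
            ⟨le_max_right _ _, Int.lt_add_one_iff.mpr (max_le hb min_le_max)⟩,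
            ⟨le_max_right _ _, Int.lt_add_one_iff.mpr (max_le hd min_le_max)⟩,
            hz.1, Int.lt_add_one_iff.mpr hz.2⟩

theorem inner_loops_eq {X Y : List Int} (o : Int × Int × Int × Int × Int × Int)
    (c : Int → Int → Bool) (s : PySem.Set (Int × Int × Int × Int × Int × Int)) :
    X.foldl (fun r x => Y.foldl (fun r y => if c x y then PySem.Set.add r o else r) r) s
      = if X.any (fun x => Y.any (c x)) then PySem.Set.add s o else s := by
  rw [← foldl_ite_add X (fun x => Y.any (c x)) o s]
  apply List.foldl_ext
  intro r x _
  rw [foldl_ite_add]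

theorem above_bricks_spec : Claim_equal_above_bricks := by
  intro brick bricks _
  unfold Spec_above_bricks above_bricks above_bricks_alt
  rw [PySem.Set.ofList_eq_foldl, ← foldl_ite_add_self]
  show List.foldl _ PySem.Set.empty bricks = _
  rw [show (PySem.Set.empty : PySem.Set (Int × Int × Int × Int × Int × Int)) = [] from rfl]
  apply List.foldl_ext
  intro s o _
  rw [inner_loops_eq, any_cell_iff o (min brick.1 brick.2.2.2.1) (max brick.1 brick.2.2.2.1)
    (min brick.2.1 brick.2.2.2.2.1) (max brick.2.1 brick.2.2.2.2.1)
    (max brick.2.2.1 brick.2.2.2.2.2 + 1) min_le_max min_le_max]
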